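-- pv_equiv track=rewrite | github.com/242lee/Albamo | 김민수/24_09_09-3주차/BJ_상금 헌터.py | get_second_prize
-- ===== SOURCE A (Python) =====
-- second_prize = [512, 256, 128, 64, 32]
--
-- second_prize_range = [1, 2, 4, 8, 16]
--
-- def get_second_prize(rank):
--     if rank == 0 or rank > sum(second_prize_range):
--         return 0  # 등수가 0이거나 범위를 벗어난 경우 상금은 0
--     cumulative = 0  # 누적 등수를 계산하기 위한 변수
--     for i in range(len(second_prize_range)):
--         cumulative += second_prize_range[i]  # 구간을 하나씩 더해가며 등수 범위를 체크
--         if rank <= cumulative:  # 해당 구간에 속하는지 확인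
--             return second_prize[i]  # 속하면 해당 상금을 반환
--     return 0  # 등수가 범위를 벗어난 경우
-- ===== SOURCE B (Python) =====
-- from bisect import bisect_left
--
-- second_prize = [512, 256, 128, 64, 32]
--
-- _prefix = [1, 3, 7, 15, 31]  # cumulative boundaries of the rank brackets
--
-- def get_second_prize(rank):
--     if rank == 0 or rank > _prefix[-1]:
--         return 0
--     return second_prize[bisect_left(_prefix, rank)]
-- ===== Notes on version B (the rewrite author's own statement) =====
-- stated objective: idiomatic
-- what changed: Replaces the per-call cumulative-sum linear scan with a binary search (bisect_left) over a precomputed prefix table of bracket boundaries.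
import Mathlib
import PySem

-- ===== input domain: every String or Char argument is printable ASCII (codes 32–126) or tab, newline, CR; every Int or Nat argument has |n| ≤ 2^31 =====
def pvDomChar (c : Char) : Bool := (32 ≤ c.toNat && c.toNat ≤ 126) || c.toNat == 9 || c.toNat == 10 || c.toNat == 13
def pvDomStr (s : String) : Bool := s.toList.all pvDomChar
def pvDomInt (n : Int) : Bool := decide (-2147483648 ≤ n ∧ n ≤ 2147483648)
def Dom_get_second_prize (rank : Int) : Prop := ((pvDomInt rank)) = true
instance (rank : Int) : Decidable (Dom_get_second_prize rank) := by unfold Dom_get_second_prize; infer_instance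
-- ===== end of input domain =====

-- B replaces A's per-call cumulative linear scan with a bisect_left binary search
-- over a precomputed prefix table (idiomatic; same results everywhere).

-- ===== PORT A =====
def second_prize : List Int := [512, 256, 128, 64, 32]
def second_prize_range : List Int := [1, 2, 4, 8, 16]

-- the 'for i in range(len(...))' loop with early return; indices are provably in
-- range, so getD 0 is exact here
def spLoopA (rank : Int) (cumulative : Int) : List Nat → Int
  | [] => 0
  | i :: rest =>
    let c := cumulative + second_prize_range.getD i 0
    if rank ≤ c then second_prize.getD i 0 else spLoopA rank c rest

def get_second_prize (rank : Int) : Int :=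
  if rank = 0 ∨ rank > second_prize_range.sum then 0
  else spLoopA rank 0 (List.range second_prize_range.length)

-- ===== PORT B =====
def pvPrefix : List Int := [1, 3, 7, 15, 31]

-- Python's bisect.bisect_left on pvPrefix (binary search over [lo, hi))
def bisectLeft (xs : List Int) (x : Int) (lo hi : Nat) : Nat :=
  if h : lo < hi then
    let mid := (lo + hi) / 2
    if xs.getD mid 0 < x then bisectLeft xs x (mid + 1) hi
    else bisectLeft xs x lo mid
  else lo
termination_by hi - lo
decreasing_by all_goals omega

def get_second_prize_alt (rank : Int) : Int :=
  if rank = 0 ∨ rank > 31 then 0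
  else second_prize.getD (bisectLeft pvPrefix rank 0 5) 0

-- ===== PRECONDITION & SPEC =====
def Spec_get_second_prize (rank : Int) (out : Int) : Prop := out = get_second_prize_alt rank
instance (rank : Int) (out : Int) : Decidable (Spec_get_second_prize rank out) := by unfold Spec_get_second_prize; infer_instance

-- ===== CLAIM (what is proved, stated in full; the proofs are below) =====
def Claim_equal_get_second_prize : Prop := ∀ (rank : Int), Dom_get_second_prize rank → Spec_get_second_prize rank (get_second_prize rank)

-- ===== LEMMAS AND PROOFS =====

-- A's loop lands in bracket i exactly when rank first falls under the i-th cumulative sum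
lemma loopA_eval (rank : Int) (v : Int)
    (hv : ((rank ≤ 1 ∧ v = 512) ∨ (1 < rank ∧ rank ≤ 3 ∧ v = 256) ∨
           (3 < rank ∧ rank ≤ 7 ∧ v = 128) ∨ (7 < rank ∧ rank ≤ 15 ∧ v = 64) ∨
           (15 < rank ∧ rank ≤ 31 ∧ v = 32))) :
    spLoopA rank 0 (List.range second_prize_range.length) = v := by
  rw [(by decide : List.range second_prize_range.length = [0, 1, 2, 3, 4])]
  rcases hv with ⟨h, rfl⟩ | ⟨h1, h2, rfl⟩ | ⟨h1, h2, rfl⟩ | ⟨h1, h2, rfl⟩ | ⟨h1, h2, rfl⟩ <;>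
    simp [spLoopA, second_prize_range, second_prize] <;> omega

-- B's binary search over the prefix table, evaluated bracket by bracket
lemma bisect_b0 (rank : Int) (h : rank ≤ 1) : bisectLeft pvPrefix rank 0 5 = 0 := by
  rw [bisectLeft]; norm_num [pvPrefix, show ¬ ((7 : Int) < rank) from by omega]
  rw [bisectLeft]; norm_num [show ¬ ((3 : Int) < rank) from by omega]
  rw [bisectLeft]; norm_num [show ¬ ((1 : Int) < rank) from by omega]
  rw [bisectLeft]; norm_num

lemma bisect_b1 (rank : Int) (h1 : 1 < rank) (h2 : rank ≤ 3) : bisectLeft pvPrefix rank 0 5 = 1 := by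
  rw [bisectLeft]; norm_num [pvPrefix, show ¬ ((7 : Int) < rank) from by omega]
  rw [bisectLeft]; norm_num [show ¬ ((3 : Int) < rank) from by omega]
  rw [bisectLeft]; norm_num [show (1 : Int) < rank from h1]
  rw [bisectLeft]; norm_num

lemma bisect_b2 (rank : Int) (h1 : 3 < rank) (h2 : rank ≤ 7) : bisectLeft pvPrefix rank 0 5 = 2 := by
  rw [bisectLeft]; norm_num [pvPrefix, show ¬ ((7 : Int) < rank) from by omega]
  rw [bisectLeft]; norm_num [show (3 : Int) < rank from h1]
  rw [bisectLeft]; norm_num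

lemma bisect_b3 (rank : Int) (h1 : 7 < rank) (h2 : rank ≤ 15) : bisectLeft pvPrefix rank 0 5 = 3 := by
  rw [bisectLeft]; norm_num [pvPrefix, show (7 : Int) < rank from h1]
  rw [bisectLeft]; norm_num [show ¬ ((31 : Int) < rank) from by omega]
  rw [bisectLeft]; norm_num [show ¬ ((15 : Int) < rank) from by omega]
  rw [bisectLeft]; norm_num

lemma bisect_b4 (rank : Int) (h1 : 15 < rank) (h2 : rank ≤ 31) : bisectLeft pvPrefix rank 0 5 = 4 := by
  rw [bisectLeft]; norm_num [pvPrefix, show (7 : Int) < rank from by omega]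
  rw [bisectLeft]; norm_num [show ¬ ((31 : Int) < rank) from by omega]
  rw [bisectLeft]; norm_num [show (15 : Int) < rank from h1]
  rw [bisectLeft]; norm_num

-- ===== VERDICT (by name: the statement is the Claim_ definition above) =====
theorem get_second_prize_spec : Claim_equal_get_second_prize := by
  intro rank _
  unfold Spec_get_second_prize
  by_cases h0 : rank = 0
  · subst h0; decide
  by_cases hhi : rank > 31
  · unfold get_second_prize get_second_prize_alt
    rw [if_pos (Or.inr (by simp [second_prize_range]; omega)), if_pos (Or.inr hhi)]
  · unfold get_second_prize get_second_prize_alt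
    rw [if_neg (by simp [second_prize_range]; omega), if_neg (by simp; omega)]
    rcases (by omega :
        rank ≤ 1 ∨ (1 < rank ∧ rank ≤ 3) ∨ (3 < rank ∧ rank ≤ 7) ∨
        (7 < rank ∧ rank ≤ 15) ∨ (15 < rank ∧ rank ≤ 31)) with
      h | ⟨h1, h2⟩ | ⟨h1, h2⟩ | ⟨h1, h2⟩ | ⟨h1, h2⟩
    · rw [loopA_eval rank 512 (by omega), bisect_b0 rank h]; decide
    · rw [loopA_eval rank 256 (by omega), bisect_b1 rank h1 h2]; decide
    · rw [loopA_eval rank 128 (by omega), bisect_b2 rank h1 h2]; decide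
    · rw [loopA_eval rank 64 (by omega), bisect_b3 rank h1 h2]; decide
    · rw [loopA_eval rank 32 (by omega), bisect_b4 rank h1 h2]; decide
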